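-- pv_equiv track=rewrite | github.com/vadim-chiriac/ro_law_mcp | romanian_legislation_mcp/document_search/document_model/document_model_builder.py | _extract_article_content
-- ===== SOURCE A (Python) =====
-- def _extract_article_content(doc_text: str, article_start: int, article_header: str) -> str:
--     """Extract the full content of an article including its text body."""
--     # Find the end of this article by looking for next structural element
--     article_start_in_text = article_start + len("Articolul")
--
--     # Use single search to find closest next element for better performance
--     article_end = len(doc_text)  # Default to end of text
--     search_patterns = ["Articolul", "Capitolul", "Titlul", "Cartea"]
--
--     for pattern in search_patterns:
--         pos = doc_text.find(pattern, article_start_in_text)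
--         if pos != -1 and pos < article_end:
--             article_end = pos
--
--     # Extract complete article content (from "Articolul" to next element)
--     article_content = doc_text[article_start:article_end].strip()
--
--     # Split into header line and body
--     lines = article_content.split('\n', 1)
--     if len(lines) > 1:
--         # Extract just the header part after "Articolul"
--         header_after_keyword = lines[0][len("Articolul"):].strip()
--         article_body = lines[1].strip()
--         # Return in consistent format: "number title\nbody"
--         return f"{header_after_keyword}\n{article_body}" if article_body else header_after_keyword
--     else:
--         # Single line article - extract part after "Articolul"
--         return lines[0][len("Articolul"):].strip()
-- ===== SOURCE B (Python) =====
-- import re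
--
-- _NEXT = re.compile("Articolul|Capitolul|Titlul|Cartea")
-- _KW = len("Articolul")
--
-- def _extract_article_content(doc_text: str, article_start: int, article_header: str) -> str:
--     """Extract the full content of an article including its text body."""
--     # One automaton pass over the tail instead of four separate scans.
--     tail = doc_text[article_start + _KW:]
--     m = _NEXT.search(tail)
--     article_end = len(doc_text) - len(tail) + m.start() if m else len(doc_text)
--     content = doc_text[article_start:article_end].strip()
--     nl = content.find('\n')
--     if nl < 0:
--         return content[_KW:].strip()
--     header = content[_KW:nl].strip()
--     body = content[nl + 1:].strip()
--     return f"{header}\n{body}" if body else header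
-- ===== Notes on version B (the rewrite author's own statement) =====
-- stated objective: idiomatic
-- what changed: A's four separate str.find scans with manual minimum tracking are replaced by one compiled regex alternation searched once over the tail slice, and the header/body split uses a single find plus slices instead of str.split(maxsplit=1).
import Mathlib
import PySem

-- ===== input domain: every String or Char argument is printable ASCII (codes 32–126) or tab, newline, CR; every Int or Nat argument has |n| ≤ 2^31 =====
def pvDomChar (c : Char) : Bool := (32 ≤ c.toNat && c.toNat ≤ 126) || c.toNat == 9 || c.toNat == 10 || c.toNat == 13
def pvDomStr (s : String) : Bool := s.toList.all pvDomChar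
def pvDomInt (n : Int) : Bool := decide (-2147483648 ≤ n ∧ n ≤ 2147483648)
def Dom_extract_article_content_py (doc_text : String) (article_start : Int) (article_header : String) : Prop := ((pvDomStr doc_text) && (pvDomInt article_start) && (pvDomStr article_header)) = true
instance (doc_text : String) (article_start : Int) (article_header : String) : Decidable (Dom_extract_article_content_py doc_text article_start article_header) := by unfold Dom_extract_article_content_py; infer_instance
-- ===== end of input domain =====

-- B replaces A's four separate forward scans (one str.find per keyword, manual minimum tracking)
-- by slicing the tail once and running a single compiled regex alternation over it (one pass);
-- the header/body split uses one find + slices instead of str.split.  Objective: idiomatic.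

-- ===== PORT A =====
def extract_article_content_py (doc_text : String) (article_start : Int) (article_header : String) : String :=
  let article_start_in_text : Int := article_start + 9  -- 9 = len("Articolul")
  let article_end : Int :=
    (["Articolul", "Capitolul", "Titlul", "Cartea"] : List String).foldl
      (fun article_end pattern =>
        let pos := PySem.Str.findFrom doc_text pattern article_start_in_text none
        if pos ≠ -1 ∧ pos < article_end then pos else article_end)
      (PySem.Str.len doc_text)
  let article_content := PySem.Str.strip (PySem.Str.slice doc_text (some article_start) (some article_end))
  let lines := (PySem.Str.splitMax? article_content "\n" 1).getD []
  if lines.length > 1 then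
    let header_after_keyword := PySem.Str.strip (PySem.Str.slice (lines.getD 0 "") (some 9) none)
    let article_body := PySem.Str.strip (lines.getD 1 "")
    if article_body ≠ "" then PySem.Str.join "\n" [header_after_keyword, article_body]
    else header_after_keyword
  else
    PySem.Str.strip (PySem.Str.slice (lines.getD 0 "") (some 9) none)

-- ===== PORT B =====
-- port of the compiled regex alternation "Articolul|Capitolul|Titlul|Cartea" searched over the
-- tail: leftmost index at which one of the four literals starts (re.search's leftmost-match rule)
def nextKeywordIdx : List Char → Nat → Option Nat
  | [], _ => none
  | c :: t, i =>
    if ("Articolul".toList.isPrefixOf (c :: t) || "Capitolul".toList.isPrefixOf (c :: t) ||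
        "Titlul".toList.isPrefixOf (c :: t) || "Cartea".toList.isPrefixOf (c :: t))
    then some i else nextKeywordIdx t (i + 1)

def extract_article_content_py_alt (doc_text : String) (article_start : Int) (article_header : String) : String :=
  let tail := PySem.Str.slice doc_text (some (article_start + 9)) none
  let article_end : Int :=
    (nextKeywordIdx tail.toList 0).elim (PySem.Str.len doc_text)
      (fun j => PySem.Str.len doc_text - PySem.Str.len tail + (j : Int))
  let content := PySem.Str.strip (PySem.Str.slice doc_text (some article_start) (some article_end))
  let nl := PySem.Str.find content "\n"
  if nl < 0 then
    PySem.Str.strip (PySem.Str.slice content (some 9) none)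
  else
    let header := PySem.Str.strip (PySem.Str.slice content (some 9) (some nl))
    let body := PySem.Str.strip (PySem.Str.slice content (some (nl + 1)) none)
    if body ≠ "" then PySem.Str.join "\n" [header, body] else header

-- ===== PRECONDITION & SPEC =====
def Spec_extract_article_content_py (doc_text : String) (article_start : Int) (article_header : String) (out : String) : Prop := out = extract_article_content_py_alt doc_text article_start article_header
instance (doc_text : String) (article_start : Int) (article_header : String) (out : String) : Decidable (Spec_extract_article_content_py doc_text article_start article_header out) := by unfold Spec_extract_article_content_py; infer_instance

-- ===== CLAIM (what is proved, stated in full; the proofs are below) =====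
def Claim_equal_extract_article_content_py : Prop := ∀ (doc_text : String) (article_start : Int) (article_header : String), Dom_extract_article_content_py doc_text article_start article_header → Spec_extract_article_content_py doc_text article_start article_header (extract_article_content_py doc_text article_start article_header)

-- ===== LEMMAS AND PROOFS =====

theorem foldl_min_spec (v : String → Int) (pats : List String) (a : Int) :
    (pats.foldl (fun ae pat => if v pat ≠ -1 ∧ v pat < ae then v pat else ae) a = a ∨
      ∃ pat ∈ pats, pats.foldl (fun ae pat => if v pat ≠ -1 ∧ v pat < ae then v pat else ae) a = v pat ∧ v pat ≠ -1) ∧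
    pats.foldl (fun ae pat => if v pat ≠ -1 ∧ v pat < ae then v pat else ae) a ≤ a ∧
    (∀ pat ∈ pats, v pat = -1 ∨ pats.foldl (fun ae pat => if v pat ≠ -1 ∧ v pat < ae then v pat else ae) a ≤ v pat) := by
  induction pats generalizing a with
  | nil => simp
  | cons q qs ih =>
    simp only [List.foldl_cons]
    by_cases hq : v q ≠ -1 ∧ v q < a
    · rw [if_pos hq]
      obtain ⟨h1, h2, h3⟩ := ih (v q)
      refine ⟨?_, by omega, ?_⟩
      · rcases h1 with h | ⟨p, hp, he, hne⟩
        · exact Or.inr ⟨q, by simp, h, hq.1⟩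
        · exact Or.inr ⟨p, by simp [hp], he, hne⟩
      · intro p hp
        rcases List.mem_cons.mp hp with rfl | hp
        · exact Or.inr h2
        · exact h3 p hp
    · rw [if_neg hq]
      obtain ⟨h1, h2, h3⟩ := ih a
      refine ⟨?_, h2, ?_⟩
      · rcases h1 with h | ⟨p, hp, he, hne⟩
        · exact Or.inl h
        · exact Or.inr ⟨p, by simp [hp], he, hne⟩
      · intro p hp
        rcases List.mem_cons.mp hp with rfl | hp
        · by_cases hne : v p = -1
          · exact Or.inl hne
          · exact Or.inr (by omega)
        · exact h3 p hp



def hitKw (l : List Char) : Bool :=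
  "Articolul".toList.isPrefixOf l || "Capitolul".toList.isPrefixOf l ||
  "Titlul".toList.isPrefixOf l || "Cartea".toList.isPrefixOf l

theorem hitKw_ne_nil {l : List Char} (h : hitKw l = true) : l ≠ [] := by
  intro he; subst he; simp [hitKw] at h

theorem scan_none (m : List Char) (i : Nat) (h : nextKeywordIdx m i = none) :
    ∀ j, hitKw (m.drop j) = false := by
  induction m generalizing i with
  | nil => intro j; simp [hitKw]
  | cons c t ih =>
    intro j
    rw [nextKeywordIdx] at h
    by_cases hc : ("Articolul".toList.isPrefixOf (c :: t) || "Capitolul".toList.isPrefixOf (c :: t) ||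
        "Titlul".toList.isPrefixOf (c :: t) || "Cartea".toList.isPrefixOf (c :: t)) = true
    · rw [if_pos hc] at h; cases h
    · rw [if_neg hc] at h
      match j with
      | 0 =>
        simp only [List.drop_zero, hitKw]
        exact Bool.not_eq_true _ ▸ (Bool.of_not_eq_true hc)
      | j + 1 => exact ih (i + 1) h j

theorem scan_some (m : List Char) (i r : Nat) (h : nextKeywordIdx m i = some r) :
    ∃ j, r = i + j ∧ hitKw (m.drop j) = true ∧ ∀ j' < j, hitKw (m.drop j') = false := by
  induction m generalizing i with
  | nil => simp [nextKeywordIdx] at h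
  | cons c t ih =>
    rw [nextKeywordIdx] at h
    by_cases hc : ("Articolul".toList.isPrefixOf (c :: t) || "Capitolul".toList.isPrefixOf (c :: t) ||
        "Titlul".toList.isPrefixOf (c :: t) || "Cartea".toList.isPrefixOf (c :: t)) = true
    · rw [if_pos hc] at h
      simp only [Option.some.injEq] at h; subst h
      refine ⟨0, by omega, ?_, by omega⟩
      simpa only [List.drop_zero, hitKw] using hc
    · rw [if_neg hc] at h
      obtain ⟨j, hj, hhit, hmin⟩ := ih (i + 1) h
      refine ⟨j + 1, by omega, by simpa using hhit, ?_⟩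
      intro j' hj'
      match j' with
      | 0 =>
        simp only [List.drop_zero, hitKw]
        exact Bool.not_eq_true _ ▸ (Bool.of_not_eq_true hc)
      | j'' + 1 => exact hmin j'' (by omega)


theorem findgo_newline (l : List Char) (k : Nat) :
    PySem.Chars.find.go ['\n'] l k =
      (if '\n' ∈ l then ((k : Int) + (l.findIdx (· == '\n') : Int)) else -1) := by
  induction l generalizing k with
  | nil => simp [PySem.Chars.find.go]
  | cons c t ih =>
    rw [PySem.Chars.find.go]
    by_cases hc : c = '\n'
    · subst hc; simp [List.isPrefixOf, List.findIdx_cons]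
    · have : (['\n'].isPrefixOf (c :: t)) = false := by
        simp [List.isPrefixOf]; exact fun h => hc h.symm
      rw [this]
      simp only [Bool.false_eq_true, if_false, ih (k + 1), List.mem_cons, List.findIdx_cons]
      have hbe : (c == '\n') = false := by simpa using hc
      rw [hbe]
      by_cases hm : '\n' ∈ t
      · simp [hm, Ne.symm hc]; ring
      · simp [hm, Ne.symm hc]

theorem splitgo_zero (fuel : Nat) (l cur : List Char) (acc : List (List Char)) :
    PySem.Chars.splitOnMax.go ['\n'] fuel 0 l cur acc = acc.reverse ++ [cur.reverse ++ l] := by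
  match fuel, l with
  | 0, l => rw [PySem.Chars.splitOnMax.go]; simp
  | fuel + 1, [] => rw [PySem.Chars.splitOnMax.go]; simp; omega
  | fuel + 1, c :: rest => rw [PySem.Chars.splitOnMax.go]; simp

theorem splitgo_one (l : List Char) (fuel : Nat) (cur : List Char) (acc : List (List Char))
    (hf : l.length < fuel) :
    PySem.Chars.splitOnMax.go ['\n'] fuel 1 l cur acc =
      (if '\n' ∈ l then
        acc.reverse ++ [cur.reverse ++ l.take (l.findIdx (· == '\n')), l.drop (l.findIdx (· == '\n') + 1)]
       else acc.reverse ++ [cur.reverse ++ l]) := by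
  induction l generalizing fuel cur acc with
  | nil =>
    match fuel, hf with
    | fuel + 1, _ => rw [PySem.Chars.splitOnMax.go]; simp; omega
  | cons c t ih =>
    match fuel, hf with
    | fuel + 1, hf =>
      rw [PySem.Chars.splitOnMax.go]
      simp only [Nat.one_ne_zero, if_false]
      by_cases hc : c = '\n'
      · subst hc
        have hp : (['\n'].isPrefixOf ('\n' :: t)) = true := by simp [List.isPrefixOf]
        rw [hp]
        simp only [if_true]
        rw [splitgo_zero]
        simp [List.findIdx_cons]
      · have hp : (['\n'].isPrefixOf (c :: t)) = false := by
          simp [List.isPrefixOf]; exact fun h => hc h.symm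
        rw [hp]
        have hbe : (c == '\n') = false := by simpa using hc
        simp only [Bool.false_eq_true, if_false]
        rw [ih fuel (c :: cur) acc (by simpa using Nat.lt_of_succ_lt_succ hf)]
        by_cases hm : '\n' ∈ t
        · simp [hm, Ne.symm hc, List.findIdx_cons, hbe]
        · simp [hm, Ne.symm hc]


theorem findFrom_clamp (cs sub : List Char) (p : Int) (hsub : sub ≠ []) :
    PySem.Chars.findFrom cs sub p none =
      (if PySem.Chars.find (cs.drop (PySem.List.clampIdx cs.length p)) sub = -1 then -1
       else (PySem.List.clampIdx cs.length p : Int) +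
         PySem.Chars.find (cs.drop (PySem.List.clampIdx cs.length p)) sub) := by
  by_cases h1 : p < 0
  · by_cases h2 : p + (cs.length : Int) < 0
    · have hk : PySem.List.clampIdx cs.length p = 0 := by
        rw [PySem.List.clampIdx, if_pos h1, if_pos (by omega : (cs.length : Int) + p < 0)]
      rw [hk, PySem.Chars.findFrom]
      simp only
      rw [if_pos h1, if_pos h2, if_neg (by omega : ¬ ((cs.length : Int) < 0))]
      simp [List.take_length]
    · have hk : PySem.List.clampIdx cs.length p = (p + cs.length).toNat := by
        rw [PySem.List.clampIdx, if_pos h1, if_neg (by omega : ¬ ((cs.length : Int) + p < 0))]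
        congr 1; omega
      rw [hk, PySem.Chars.findFrom]
      simp only
      rw [if_pos h1, if_neg h2, if_neg (by omega : ¬ ((cs.length : Int) < p + cs.length))]
      simp [List.take_length]
      rw [max_eq_left (by omega : (0 : Int) ≤ p + (cs.length : Int))]
  · have h1' : 0 ≤ p := by omega
    by_cases h3 : p ≤ (cs.length : Int)
    · have hk : PySem.List.clampIdx cs.length p = p.toNat := by
        rw [PySem.List.clampIdx, if_neg h1]
        simp; omega
      rw [hk, PySem.Chars.findFrom]
      simp only
      rw [if_neg h1, if_neg (by omega : ¬ ((cs.length : Int) < p))]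
      simp [List.take_length]
      congr 2; omega
    · -- p past the end: findFrom returns -1, and the clamped drop is []
      have hk : PySem.List.clampIdx cs.length p = cs.length := by
        rw [PySem.List.clampIdx, if_neg h1]
        simp; omega
      rw [hk, PySem.Chars.findFrom]
      simp only
      rw [if_neg h1, if_pos (by omega : (cs.length : Int) < p)]
      have : PySem.Chars.find (cs.drop cs.length) sub = -1 := by
        rw [List.drop_length, PySem.Chars.find_eq_neg_one_iff]
        intro hinf
        exact hsub (List.eq_nil_of_infix_nil hinf)
      rw [this]; simp

theorem hsplitA (c : String) : PySem.Chars.splitMax? c.toList "\n".toList 1 =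
      some (if '\n' ∈ c.toList then
        [c.toList.take (c.toList.findIdx (· == '\n')), c.toList.drop (c.toList.findIdx (· == '\n') + 1)]
       else [c.toList]) := by
    rw [PySem.Chars.splitMax?]
    have : ("\n".toList.isEmpty) = false := by decide
    rw [this]
    simp only [Bool.false_eq_true, if_false, Option.some.injEq]
    rw [PySem.Chars.splitOnMax]
    rw [if_neg (by omega : ¬ (1 : Int) < 0)]
    have h1 : (1 : Int).toNat = 1 := rfl
    have h2 : ("\n".toList) = ['\n'] := by decide
    rw [h1, h2, splitgo_one _ _ _ _ (by omega)]
    split_ifs <;> simp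

theorem hfindA (c : String) : PySem.Str.find c "\n" =
      (if '\n' ∈ c.toList then ((c.toList.findIdx (· == '\n') : Int)) else -1) := by
    show PySem.Chars.find c.toList "\n".toList = _
    have h2 : ("\n".toList) = ['\n'] := by decide
    rw [h2, PySem.Chars.find, findgo_newline]
    split_ifs <;> simp

-- a keyword-pattern prefix of l makes the scanner's test fire
theorem hit_of_prefix {pat : String} (hp : pat ∈ (["Articolul", "Capitolul", "Titlul", "Cartea"] : List String))
    {l : List Char} (h : pat.toList <+: l) : hitKw l = true := by
  fin_cases hp <;> (simp only [hitKw, Bool.or_eq_true, List.isPrefixOf_iff_prefix]; simp at h; tauto)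

-- some keyword fires the test → one of the four find positions is exactly there
theorem prefix_of_hit {l : List Char} (h : hitKw l = true) :
    ∃ pat ∈ (["Articolul", "Capitolul", "Titlul", "Cartea"] : List String), pat.toList <+: l := by
  simp only [hitKw, Bool.or_eq_true] at h
  rcases h with ((h | h) | h) | h
  · exact ⟨"Articolul", by simp, List.isPrefixOf_iff_prefix.mp h⟩
  · exact ⟨"Capitolul", by simp, List.isPrefixOf_iff_prefix.mp h⟩
  · exact ⟨"Titlul", by simp, List.isPrefixOf_iff_prefix.mp h⟩
  · exact ⟨"Cartea", by simp, List.isPrefixOf_iff_prefix.mp h⟩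

theorem article_end_eq (cs : List Char) (p : Int) :
    (["Articolul", "Capitolul", "Titlul", "Cartea"] : List String).foldl
      (fun article_end pattern =>
        let pos := PySem.Chars.findFrom cs pattern.toList p none
        if pos ≠ -1 ∧ pos < article_end then pos else article_end)
      (cs.length : Int)
    = (nextKeywordIdx (cs.drop (PySem.List.clampIdx cs.length p)) 0).elim (cs.length : Int)
        (fun j => (cs.length : Int) - ((cs.drop (PySem.List.clampIdx cs.length p)).length : Int) + (j : Int)) := by
  have hk : PySem.List.clampIdx cs.length p ≤ cs.length := PySem.List.clampIdx_le cs.length p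
  have hcongr := PySem.List.foldl_congr_mem (["Articolul", "Capitolul", "Titlul", "Cartea"] : List String)
    (fun article_end pattern =>
        let pos := PySem.Chars.findFrom cs pattern.toList p none
        if pos ≠ -1 ∧ pos < article_end then pos else article_end)
    (fun article_end pattern =>
        let pos := (if PySem.Chars.find (cs.drop (PySem.List.clampIdx cs.length p)) pattern.toList = -1 then -1
          else (PySem.List.clampIdx cs.length p : Int) +
            PySem.Chars.find (cs.drop (PySem.List.clampIdx cs.length p)) pattern.toList)
        if pos ≠ -1 ∧ pos < article_end then pos else article_end)
    (cs.length : Int)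
    (by intro acc pat hpat
        simp only
        rw [findFrom_clamp cs pat.toList p (by fin_cases hpat <;> decide)])
  rw [hcongr]
  set K := PySem.List.clampIdx cs.length p with hKdef
  set m := cs.drop K with hmdef
  have hmlen : m.length = cs.length - K := by rw [hmdef]; simp
  set v : String → Int := fun pat =>
    (if PySem.Chars.find m pat.toList = -1 then -1
     else (K : Int) + PySem.Chars.find m pat.toList) with hvdef
  have hspec := foldl_min_spec v (["Articolul", "Capitolul", "Titlul", "Cartea"] : List String) (cs.length : Int)
  cases hscan : nextKeywordIdx m 0 with
  | none =>
    have hno := scan_none m 0 hscan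
    have hall : ∀ pat ∈ (["Articolul", "Capitolul", "Titlul", "Cartea"] : List String),
        PySem.Chars.find m pat.toList = -1 := by
      intro pat hpat
      rw [PySem.Chars.find_eq_neg_one_iff]
      intro hinf
      obtain ⟨j, hj⟩ := (PySem.Chars.exists_prefix_drop_iff_isIn pat.toList m).mpr
        ((PySem.Chars.isIn_iff_infix pat.toList m).mpr hinf)
      have := hit_of_prefix hpat hj
      rw [hno j] at this; cases this
    simp only
    rw [PySem.List.foldl_congr_mem _ _ (fun (acc : Int) (_ : String) => acc) _
      (by intro acc pat hpat; simp [hall pat hpat])]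
    simp [List.foldl]
  | some r =>
    obtain ⟨j, hr0, hhit, hmin⟩ := scan_some m 0 r hscan
    have hjlt : j < m.length := by
      by_contra hle
      have hdrop : m.drop j = [] := List.drop_eq_nil_of_le (by omega)
      rw [hdrop] at hhit
      exact hitKw_ne_nil hhit rfl
    -- the witness pattern at j
    obtain ⟨pat0, hpat0, hpre0⟩ := prefix_of_hit hhit
    have hne0 : PySem.Chars.find m pat0.toList ≠ -1 := by
      rw [Ne, PySem.Chars.find_eq_neg_one_iff, not_not]
      rw [← PySem.Chars.isIn_iff_infix, ← PySem.Chars.exists_prefix_drop_iff_isIn]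
      exact ⟨j, hpre0⟩
    have hge0 : 0 ≤ PySem.Chars.find m pat0.toList := by
      have := PySem.Chars.neg_one_le_find m pat0.toList; omega
    obtain ⟨hpre0', hmin0⟩ := PySem.Chars.find_spec hge0
    have hfj : PySem.Chars.find m pat0.toList = (j : Int) := by
      rcases Nat.lt_trichotomy (PySem.Chars.find m pat0.toList).toNat j with hlt | heq | hgt
      · exfalso
        have hfalse := hmin _ hlt
        have htrue := hit_of_prefix hpat0 hpre0'
        rw [hfalse] at htrue; cases htrue
      · omega
      · exact absurd hpre0 (hmin0 j hgt)
    have hv0 : v pat0 = (K : Int) + (j : Int) := by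
      rw [hvdef]; simp only; rw [if_neg hne0, hfj]
    obtain ⟨hcase, hlea, hlb⟩ := hspec
    set F := (["Articolul", "Capitolul", "Titlul", "Cartea"] : List String).foldl
      (fun ae pat => if v pat ≠ -1 ∧ v pat < ae then v pat else ae) (cs.length : Int) with hFdef
    have hub : F ≤ (K : Int) + (j : Int) := by
      rcases hlb pat0 hpat0 with h | h
      · exfalso; rw [hvdef] at h; simp only at h; rw [if_neg hne0] at h; omega
      · rwa [hv0] at h
    have hlbound : (K : Int) + (j : Int) ≤ F := by
      rcases hcase with he | ⟨pat1, hpat1, he1, hne1⟩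
      · exfalso; rw [he] at hub; omega
      · have hge1 : 0 ≤ PySem.Chars.find m pat1.toList := by
          have := PySem.Chars.neg_one_le_find m pat1.toList
          rw [hvdef] at hne1; simp only at hne1
          by_cases hf : PySem.Chars.find m pat1.toList = -1
          · rw [if_pos hf] at hne1; exact absurd rfl hne1
          · omega
        obtain ⟨hpre1, _⟩ := PySem.Chars.find_spec hge1
        have hhit1 := hit_of_prefix hpat1 hpre1
        have hjle : j ≤ (PySem.Chars.find m pat1.toList).toNat := by
          by_contra hgt
          have hfalse := hmin _ (by omega : (PySem.Chars.find m pat1.toList).toNat < j)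
          rw [hfalse] at hhit1; cases hhit1
        have hne1' : PySem.Chars.find m pat1.toList ≠ -1 := by omega
        rw [he1, hvdef]; simp only; rw [if_neg hne1']
        omega
    have hF : F = (K : Int) + (j : Int) := le_antisymm hub hlbound
    rw [Nat.zero_add] at hr0
    subst hr0
    rw [hF]
    show (K : Int) + (r : Int) = (cs.length : Int) - (m.length : Int) + (r : Int)
    have hmlen' : (m.length : Int) = (cs.length : Int) - (K : Int) := by
      rw [hmlen]; exact Nat.cast_sub hk
    rw [hmlen']
    ring


theorem tail_eq (c : String) :
    (if ((PySem.Str.splitMax? c "\n" 1).getD []).length > 1 then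
       (if PySem.Str.strip (((PySem.Str.splitMax? c "\n" 1).getD []).getD 1 "") ≠ "" then
          PySem.Str.join "\n" [PySem.Str.strip (PySem.Str.slice (((PySem.Str.splitMax? c "\n" 1).getD []).getD 0 "") (some 9) none),
            PySem.Str.strip (((PySem.Str.splitMax? c "\n" 1).getD []).getD 1 "")]
        else PySem.Str.strip (PySem.Str.slice (((PySem.Str.splitMax? c "\n" 1).getD []).getD 0 "") (some 9) none))
     else PySem.Str.strip (PySem.Str.slice (((PySem.Str.splitMax? c "\n" 1).getD []).getD 0 "") (some 9) none))
    = (if PySem.Str.find c "\n" < 0 then PySem.Str.strip (PySem.Str.slice c (some 9) none)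
       else
         (if PySem.Str.strip (PySem.Str.slice c (some (PySem.Str.find c "\n" + 1)) none) ≠ "" then
            PySem.Str.join "\n" [PySem.Str.strip (PySem.Str.slice c (some 9) (some (PySem.Str.find c "\n"))),
              PySem.Str.strip (PySem.Str.slice c (some (PySem.Str.find c "\n" + 1)) none)]
          else PySem.Str.strip (PySem.Str.slice c (some 9) (some (PySem.Str.find c "\n"))))) := by
  have hs : PySem.Str.splitMax? c "\n" 1 =
      some (List.map String.ofList (if '\n' ∈ c.toList then
        [c.toList.take (c.toList.findIdx (· == '\n')), c.toList.drop (c.toList.findIdx (· == '\n') + 1)]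
       else [c.toList])) := by
    rw [PySem.Str.splitMax?, hsplitA]; rfl
  by_cases hm : '\n' ∈ c.toList
  · set jn := c.toList.findIdx (· == '\n') with hjn
    rw [hfindA, hs]
    simp only [if_pos hm, Option.getD_some, List.map_cons, List.map_nil, List.length_cons,
      List.length_nil, List.getD_cons_zero, List.getD_cons_succ]
    rw [if_pos (by omega : 1 + 1 > 1), if_neg (by omega : ¬ ((jn : Int) < 0))]
    have hH : PySem.Str.strip (PySem.Str.slice (String.ofList (List.take jn c.toList)) (some 9) none)
        = PySem.Str.strip (PySem.Str.slice c (some 9) (some (jn : Int))) := by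
      simp only [PySem.Str.strip, PySem.Str.slice, String.toList_ofList]
      apply congrArg
      apply congrArg
      simp only [PySem.Chars.slice_eq_listSlice]
      rw [PySem.List.slice_from (List.take jn c.toList) (by omega : (0 : Int) ≤ 9),
        PySem.List.slice_toNat c.toList (by omega : (0 : Int) ≤ 9) (by omega : (0 : Int) ≤ (jn : Int))]
      have h9 : (9 : Int).toNat = 9 := rfl
      have hj : ((jn : Int)).toNat = jn := by omega
      rw [h9, hj, List.drop_take]
    have hB : PySem.Str.strip (String.ofList (List.drop (jn + 1) c.toList))
        = PySem.Str.strip (PySem.Str.slice c (some ((jn : Int) + 1)) none) := by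
      simp only [PySem.Str.strip, PySem.Str.slice, String.toList_ofList]
      apply congrArg
      apply congrArg
      simp only [PySem.Chars.slice_eq_listSlice]
      rw [PySem.List.slice_from c.toList (by omega : (0 : Int) ≤ (jn : Int) + 1)]
      have hj : ((jn : Int) + 1).toNat = jn + 1 := by omega
      rw [hj]
    rw [hH, hB]
  · rw [hfindA, if_neg hm]
    rw [hs]
    simp only [if_neg hm, Option.getD_some, List.map_cons, List.map_nil, List.length_cons,
      List.length_nil, List.getD_cons_zero]
    rw [if_neg (by omega : ¬ 0 + 1 > 1), if_pos (by omega : (-1 : Int) < 0)]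
    simp only [PySem.Str.slice, PySem.Str.strip, String.toList_ofList]


-- glue: B's article_end expression equals A's fold
theorem end_glue (doc_text : String) (article_start : Int) :
    ((nextKeywordIdx (PySem.Str.slice doc_text (some (article_start + 9)) none).toList 0).elim
        (PySem.Str.len doc_text)
        (fun j => PySem.Str.len doc_text -
          PySem.Str.len (PySem.Str.slice doc_text (some (article_start + 9)) none) + (j : Int)))
    = (["Articolul", "Capitolul", "Titlul", "Cartea"] : List String).foldl
        (fun article_end pattern =>
          let pos := PySem.Str.findFrom doc_text pattern (article_start + 9) none
          if pos ≠ -1 ∧ pos < article_end then pos else article_end)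
        (PySem.Str.len doc_text) := by
  have htl : (PySem.Str.slice doc_text (some (article_start + 9)) none).toList
      = doc_text.toList.drop (PySem.List.clampIdx doc_text.toList.length (article_start + 9)) := by
    simp only [PySem.Str.slice, String.toList_ofList, PySem.Chars.slice_eq_listSlice,
      PySem.List.slice_some_none]
  simp only [PySem.Str.len, PySem.Str.findFrom, htl]
  exact (article_end_eq doc_text.toList (article_start + 9)).symm

-- ===== VERDICT (by name: the statement is the Claim_ definition above) =====
theorem extract_article_content_py_spec : Claim_equal_extract_article_content_py := by
  intro doc_text article_start article_header _
  unfold Spec_extract_article_content_py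
  show extract_article_content_py doc_text article_start article_header
    = extract_article_content_py_alt doc_text article_start article_header
  simp only [extract_article_content_py, extract_article_content_py_alt]
  rw [end_glue doc_text article_start]
  exact tail_eq _
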